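-- pv_equiv track=rewrite | github.com/LuisAlejandro/pipsalabim | pipsalabim/api/report.py | fill_with_stdlib
-- ===== SOURCE A (Python) =====
-- def fill_with_stdlib(datadict, stdlibdata):
--     """
--     Fill ``datadict`` with modules from ``stdlibdata`` if found.
--
--     :param datadict: a dictionary containing modules as keys and
--                      a list as values.
--     :param stdlibdata: a dictionary containing the modules of the standard
--                        library of each python version.
--     :return: a dictionary containing information about the location of each
--              imported module.
--
--     .. versionadded:: 0.1.0
--     """
--     for module, where in datadict.items():
--         if where:
--             continue
--         for version, mods in stdlibdata.items():
--             if module not in mods: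
--                 continue
--             datadict[module].append('STDLIB{0}'.format(version))
--     return datadict
-- ===== SOURCE B (Python) =====
-- def fill_with_stdlib(datadict, stdlibdata):
--     tags = {}
--     for version, mods in stdlibdata.items():
--         for module in dict.fromkeys(mods):
--             tags.setdefault(module, []).append('STDLIB{0}'.format(version))
--     for module, where in datadict.items():
--         if not where:
--             where.extend(tags.get(module, ()))
--     return datadict
-- ===== Notes on version B (the rewrite author's own statement) =====
-- stated objective: faster
-- what changed: Replaces A's nested scan (for each unlocated module, scan every version's module list) by a hash index: one pass over stdlibdata builds a module-to-tags dictionary, then one lookup pass over datadict appends the precomputed tags.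
import Mathlib
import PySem

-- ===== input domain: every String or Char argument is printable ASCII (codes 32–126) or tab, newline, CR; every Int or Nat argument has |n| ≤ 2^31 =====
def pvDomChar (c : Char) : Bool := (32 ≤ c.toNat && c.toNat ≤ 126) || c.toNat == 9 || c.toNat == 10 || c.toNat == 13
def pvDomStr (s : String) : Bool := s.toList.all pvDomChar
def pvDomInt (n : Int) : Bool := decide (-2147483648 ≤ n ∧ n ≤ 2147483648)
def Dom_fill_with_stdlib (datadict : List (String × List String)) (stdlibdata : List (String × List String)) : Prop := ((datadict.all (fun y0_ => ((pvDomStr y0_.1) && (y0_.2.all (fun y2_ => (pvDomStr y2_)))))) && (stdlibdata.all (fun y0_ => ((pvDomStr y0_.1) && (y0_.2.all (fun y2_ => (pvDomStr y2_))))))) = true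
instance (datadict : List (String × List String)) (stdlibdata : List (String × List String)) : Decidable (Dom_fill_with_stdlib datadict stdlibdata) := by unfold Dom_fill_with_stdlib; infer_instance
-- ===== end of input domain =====

-- B builds a module→tags index over stdlibdata once and then tags datadict by lookup,
-- removing A's per-module scan of every version's module list (objective: faster).
-- Both Pythons mutate datadict in place identically; the equivalence is about the return value.

-- ===== PORT A =====
-- A iterates datadict.items(); each iteration reads `where` once and appends only to
-- that module's own value, so a per-entry transformation is exact for a Python dict.
def fill_with_stdlib (datadict : List (String × List String)) (stdlibdata : List (String × List String)) : List (String × List String) :=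
  datadict.map (fun p =>
    if p.2 ≠ [] then p                                 -- `if where: continue`
    else (p.1, stdlibdata.foldl (fun w q =>            -- `for version, mods in stdlibdata.items():`
      if q.2.contains p.1 then w ++ ["STDLIB" ++ q.1]  -- `if module not in mods: continue` / append
      else w) p.2))

-- ===== PORT B =====
-- `tags.setdefault(module, []).append(tag)` is Dict.modify with default []; `dict.fromkeys(mods)`
-- is PySem.List.dedup; `where.extend(tags.get(module, ()))` per entry is exact for a Python dict.
def fill_with_stdlib_alt (datadict : List (String × List String)) (stdlibdata : List (String × List String)) : List (String × List String) :=
  let tags : PySem.Dict String (List String) :=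
    stdlibdata.foldl (fun t q =>
      (PySem.List.dedup q.2).foldl (fun t m =>
        t.modify m [] (fun w => w ++ ["STDLIB" ++ q.1])) t) PySem.Dict.empty
  datadict.map (fun p =>
    if p.2 = [] then (p.1, p.2 ++ tags.getD p.1 []) else p)

-- ===== PRECONDITION & SPEC =====
def Spec_fill_with_stdlib (datadict : List (String × List String)) (stdlibdata : List (String × List String)) (out : List (String × List String)) : Prop := out = fill_with_stdlib_alt datadict stdlibdata
instance (datadict : List (String × List String)) (stdlibdata : List (String × List String)) (out : List (String × List String)) : Decidable (Spec_fill_with_stdlib datadict stdlibdata out) := by unfold Spec_fill_with_stdlib; infer_instance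

-- ===== CLAIM =====
def Claim_equal_fill_with_stdlib : Prop := ∀ (datadict : List (String × List String)) (stdlibdata : List (String × List String)), Dom_fill_with_stdlib datadict stdlibdata → Spec_fill_with_stdlib datadict stdlibdata (fill_with_stdlib datadict stdlibdata)

-- ===== LEMMAS AND PROOFS =====

-- One version's setdefault-append sweep over a duplicate-free list touches key m once iff m ∈ l.
theorem pv_inner (l : List String) (hl : l.Nodup) (tag m : String) :
    ∀ t : PySem.Dict String (List String),
      (l.foldl (fun t x => t.modify x [] (fun w => w ++ [tag])) t).getD m []
      = t.getD m [] ++ (if m ∈ l then [tag] else []) := by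
  induction l with
  | nil => intro t; simp
  | cons x l ih =>
    intro t
    have hx : x ∉ l := (List.nodup_cons.mp hl).1
    have hl' : l.Nodup := (List.nodup_cons.mp hl).2
    simp only [List.foldl_cons]
    rw [ih hl']
    by_cases hm : m = x
    · subst hm
      rw [PySem.Dict.getD_modify_self]
      simp [hx]
    · rw [PySem.Dict.getD_modify_of_ne _ _ _ hm]
      by_cases hin : m ∈ l <;> simp [hm, hin]

-- The whole index-building pass: tags[m] is one tag per version whose mods contain m, in order.
theorem pv_index (sd : List (String × List String)) (m : String) :
    ∀ t : PySem.Dict String (List String),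
      (sd.foldl (fun t q =>
        (PySem.List.dedup q.2).foldl (fun t x =>
          t.modify x [] (fun w => w ++ ["STDLIB" ++ q.1])) t) t).getD m []
      = t.getD m [] ++ (sd.filter (fun q => q.2.contains m)).map (fun q => "STDLIB" ++ q.1) := by
  induction sd with
  | nil => intro t; simp
  | cons q sd ih =>
    intro t
    simp only [List.foldl_cons]
    rw [ih, pv_inner _ (PySem.List.nodup_dedup q.2) _ m t]
    by_cases hc : m ∈ q.2
    · simp [hc]
    · simp [hc]

-- ===== VERDICT =====
theorem fill_with_stdlib_spec : Claim_equal_fill_with_stdlib := by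
  intro datadict stdlibdata _
  unfold Spec_fill_with_stdlib fill_with_stdlib fill_with_stdlib_alt
  apply List.map_congr_left
  intro p _
  by_cases hw : p.2 = []
  · rw [if_neg (by simp [hw]), if_pos hw]
    rw [pv_index stdlibdata p.1 PySem.Dict.empty]
    have hfold := PySem.List.foldl_append_if (fun q : String × List String => q.2.contains p.1)
      (fun q : String × List String => "STDLIB" ++ q.1) stdlibdata p.2
    simpa using hfold
  · rw [if_pos (by simp [hw]), if_neg hw]
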